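-- pv_equiv track=rewrite | github.com/Keeady/daily-coding-challenge | Array/optimal_combination_sum.py | find_optimal_combination
-- ===== SOURCE A (Python) =====
-- def find_optimal_combination(arr1, arr2, target):
--     max_total = 0
--     max_pairs = []
--
--     for num1 in arr1:
--         if num1 >= target:
--             continue
--
--         for num2 in arr2:
--             if num2 >= target:
--                 continue
--
--             temp = []
--             # combine if pair don't exceed max
--             temp_total = num1 + num2
--             if temp_total <= target:
--                 if temp_total == max_total:
--                     max_pairs.append([num1, num2])
--                 elif temp_total > max_total:
--                     max_pairs = []
--                     max_total = temp_total
--                     max_pairs.append([num1, num2])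
--
--     return max_pairs
-- ===== SOURCE B (Python) =====
-- def find_optimal_combination(arr1, arr2, target):
--     # Pass 1: find the best (maximum) qualifying pair sum, floored at 0.
--     best = 0
--     for num1 in arr1:
--         if num1 < target:
--             for num2 in arr2:
--                 if num2 < target and num1 + num2 <= target:
--                     if num1 + num2 > best:
--                         best = num1 + num2
--     # Pass 2: collect every qualifying pair whose sum equals best.
--     result = []
--     for num1 in arr1:
--         if num1 < target:
--             for num2 in arr2:
--                 if num2 < target and num1 + num2 <= target and num1 + num2 == best:
--                     result.append([num1, num2])
--     return result
-- ===== Notes on version B (the rewrite author's own statement) =====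
-- stated objective: simpler
-- what changed: Replaces A's single pass that interleaves tracking the running maximum with resetting/extending the result list by a two-pass decomposition: first compute the best qualifying sum (floored at 0), then collect all qualifying pairs whose sum equals it.
import Mathlib
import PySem

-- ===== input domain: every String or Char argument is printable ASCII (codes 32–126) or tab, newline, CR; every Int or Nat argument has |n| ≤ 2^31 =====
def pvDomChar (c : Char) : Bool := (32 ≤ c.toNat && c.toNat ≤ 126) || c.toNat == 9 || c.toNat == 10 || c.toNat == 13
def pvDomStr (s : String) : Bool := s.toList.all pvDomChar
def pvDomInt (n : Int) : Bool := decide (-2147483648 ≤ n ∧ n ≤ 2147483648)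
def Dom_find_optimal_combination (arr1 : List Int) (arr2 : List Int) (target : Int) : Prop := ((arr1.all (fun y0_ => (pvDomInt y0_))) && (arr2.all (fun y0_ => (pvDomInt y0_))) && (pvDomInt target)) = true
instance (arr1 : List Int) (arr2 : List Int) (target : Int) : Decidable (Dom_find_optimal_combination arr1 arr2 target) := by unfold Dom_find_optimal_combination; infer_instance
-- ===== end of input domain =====

-- B replaces A's interleaved track-and-reset single pass with a two-pass decomposition
-- (compute the best qualifying sum, then collect all pairs achieving it); same cost, simpler.

-- ===== PORT A =====
def find_optimal_combination (arr1 : List Int) (arr2 : List Int) (target : Int) : List (List Int) :=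
  (arr1.foldl (fun (st : Int × List (List Int)) num1 =>
    if num1 ≥ target then st
    else arr2.foldl (fun st num2 =>
      if num2 ≥ target then st
      else
        if num1 + num2 ≤ target then
          if num1 + num2 = st.1 then (st.1, st.2 ++ [[num1, num2]])
          else if num1 + num2 > st.1 then (num1 + num2, [[num1, num2]])
          else st
        else st) st) (0, [])).2

-- ===== PORT B =====
def find_optimal_combination_alt (arr1 : List Int) (arr2 : List Int) (target : Int) : List (List Int) :=
  let best : Int := arr1.foldl (fun (b : Int) num1 =>
    if num1 < target then
      arr2.foldl (fun b num2 =>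
        if num2 < target ∧ num1 + num2 ≤ target then
          if num1 + num2 > b then num1 + num2 else b
        else b) b
    else b) 0
  arr1.foldl (fun (res : List (List Int)) num1 =>
    if num1 < target then
      arr2.foldl (fun res num2 =>
        if num2 < target ∧ num1 + num2 ≤ target ∧ num1 + num2 = best then
          res ++ [[num1, num2]]
        else res) res
    else res) []

-- ===== PRECONDITION & SPEC =====
def Spec_find_optimal_combination (arr1 : List Int) (arr2 : List Int) (target : Int) (out : List (List Int)) : Prop := out = find_optimal_combination_alt arr1 arr2 target
instance (arr1 : List Int) (arr2 : List Int) (target : Int) (out : List (List Int)) : Decidable (Spec_find_optimal_combination arr1 arr2 target out) := by unfold Spec_find_optimal_combination; infer_instance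

-- ===== CLAIM (what is proved, stated in full; the proofs are below) =====
def Claim_equal_find_optimal_combination : Prop := ∀ (arr1 : List Int) (arr2 : List Int) (target : Int), Dom_find_optimal_combination arr1 arr2 target → Spec_find_optimal_combination arr1 arr2 target (find_optimal_combination arr1 arr2 target)

-- ===== LEMMAS AND PROOFS =====

-- The qualifying pairs, in the order both programs' nested loops visit them.
def pvRow (arr2 : List Int) (target n1 : Int) : List (Int × Int) :=
  (arr2.filter (fun n2 => decide (n2 < target ∧ n1 + n2 ≤ target))).map (fun n2 => (n1, n2))

def pvQual (arr1 arr2 : List Int) (target : Int) : List (Int × Int) :=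
  arr1.flatMap (fun n1 => if n1 < target then pvRow arr2 target n1 else [])

-- running maximum (floored at 0) of the qualifying sums
def pvM (L : List (Int × Int)) : Int :=
  L.foldl (fun b p => if p.1 + p.2 > b then p.1 + p.2 else b) 0

-- inner loop with the canonical guard = fold of g over the row
theorem pv_inner_eq {σ : Type} (g : σ → Int → Int → σ) (n1 target : Int) :
    ∀ (arr2 : List Int) (s : σ),
      arr2.foldl (fun s n2 => if n2 < target ∧ n1 + n2 ≤ target then g s n1 n2 else s) s
        = (pvRow arr2 target n1).foldl (fun s p => g s p.1 p.2) s := by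
  intro arr2
  induction arr2 with
  | nil => intro s; simp [pvRow]
  | cons n2 l ih =>
    intro s
    by_cases h : n2 < target ∧ n1 + n2 ≤ target <;>
      simp [pvRow, h, ih]

theorem pv_nested_eq {σ : Type} (g : σ → Int → Int → σ) (arr2 : List Int) (target : Int) :
    ∀ (arr1 : List Int) (s : σ),
      arr1.foldl (fun s n1 =>
          if n1 < target then
            arr2.foldl (fun s n2 => if n2 < target ∧ n1 + n2 ≤ target then g s n1 n2 else s) s
          else s) s
        = (pvQual arr1 arr2 target).foldl (fun s p => g s p.1 p.2) s := by
  intro arr1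
  induction arr1 with
  | nil => intro s; simp [pvQual]
  | cons n1 l ih =>
    intro s
    by_cases h : n1 < target <;>
      simp [pvQual, h, pv_inner_eq, List.foldl_append] at * <;> exact ih _

-- the fold computing pvM only grows, and bounds every element's sum
theorem pvM_step_ge (L : List (Int × Int)) : ∀ (b : Int),
    b ≤ L.foldl (fun b p => if p.1 + p.2 > b then p.1 + p.2 else b) b := by
  induction L with
  | nil => intro b; simp
  | cons p l ih =>
    intro b
    by_cases h : p.1 + p.2 > b
    · simp only [List.foldl_cons, if_pos h]; exact le_trans (le_of_lt h) (ih _)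
    · simpa [h] using ih b

theorem pv_mem_le_M (L : List (Int × Int)) : ∀ (b : Int) (p : Int × Int), p ∈ L →
    p.1 + p.2 ≤ L.foldl (fun b p => if p.1 + p.2 > b then p.1 + p.2 else b) b := by
  induction L with
  | nil => intro _ _ h; cases h
  | cons q l ih =>
    intro b p hp
    rcases List.mem_cons.mp hp with h | h
    · subst h
      by_cases hq : p.1 + p.2 > b
      · simp only [List.foldl_cons, if_pos hq]; exact pvM_step_ge l _
      · simpa [if_neg hq] using le_trans (by omega : p.1 + p.2 ≤ b) (pvM_step_ge l b)
    · by_cases hq : q.1 + q.2 > b <;> simp only [List.foldl_cons, if_pos, hq] <;>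
        [exact ih _ p h; exact ih _ p h]

def pvStepA (st : Int × List (List Int)) (n1 n2 : Int) : Int × List (List Int) :=
  if n1 + n2 = st.1 then (st.1, st.2 ++ [[n1, n2]])
  else if n1 + n2 > st.1 then (n1 + n2, [[n1, n2]])
  else st

-- main invariant: A's fold over the qualifying list computes (max, all maximizers)
theorem pv_invariant (L : List (Int × Int)) :
    L.foldl (fun st p => pvStepA st p.1 p.2) (0, []) =
      (pvM L, (L.filter (fun p => decide (p.1 + p.2 = pvM L))).map (fun p => [p.1, p.2])) := by
  induction L using List.reverseRecOn with
  | nil => simp [pvM]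
  | append_singleton l p ih =>
    have hM : pvM (l ++ [p]) = if p.1 + p.2 > pvM l then p.1 + p.2 else pvM l := by
      simp [pvM, List.foldl_append]
    rw [List.foldl_append, ih]
    simp only [List.foldl_cons, List.foldl_nil]
    by_cases h1 : p.1 + p.2 = pvM l
    · have hM' : pvM (l ++ [p]) = pvM l := by rw [hM]; omega
      simp [pvStepA, h1, hM', List.filter_append, List.map_append]
    · by_cases h2 : p.1 + p.2 > pvM l
      · have hM' : pvM (l ++ [p]) = p.1 + p.2 := by rw [hM]; simp [h2]
        have hnil : l.filter (fun q => decide (q.1 + q.2 = pvM (l ++ [p]))) = [] := by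
          apply List.filter_eq_nil_iff.mpr
          intro q hq
          have hle : q.1 + q.2 ≤ pvM l := pv_mem_le_M l 0 q hq
          simp only [decide_eq_true_eq, hM']
          omega
        simp only [List.filter_append, hnil]
        simp [pvStepA, h1, h2, hM']
      · have hM' : pvM (l ++ [p]) = pvM l := by rw [hM]; simp [h2]
        simp [pvStepA, h1, h2, hM', List.filter_append]
  
-- collecting fold = filter-and-map
theorem pv_collect (best : Int) (L : List (Int × Int)) : ∀ (res : List (List Int)),
    L.foldl (fun res p => if p.1 + p.2 = best then res ++ [[p.1, p.2]] else res) res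
      = res ++ (L.filter (fun p => decide (p.1 + p.2 = best))).map (fun p => [p.1, p.2]) := by
  induction L with
  | nil => intro res; simp
  | cons p l ih =>
    intro res
    by_cases h : p.1 + p.2 = best <;> simp [h, ih]

-- A's port, rewritten to the canonical nested-guard shape
theorem pv_A_eq (arr1 arr2 : List Int) (target : Int) :
    find_optimal_combination arr1 arr2 target =
      ((pvQual arr1 arr2 target).foldl (fun st p => pvStepA st p.1 p.2) (0, [])).2 := by
  unfold find_optimal_combination
  rw [show
    (fun (st : Int × List (List Int)) num1 =>
      if num1 ≥ target then st
      else arr2.foldl (fun st num2 =>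
        if num2 ≥ target then st
        else
          if num1 + num2 ≤ target then
            if num1 + num2 = st.1 then (st.1, st.2 ++ [[num1, num2]])
            else if num1 + num2 > st.1 then (num1 + num2, [[num1, num2]])
            else st
          else st) st)
    = (fun (st : Int × List (List Int)) n1 =>
        if n1 < target then
          arr2.foldl (fun st n2 =>
            if n2 < target ∧ n1 + n2 ≤ target then pvStepA st n1 n2 else st) st
        else st) from ?_]
  · rw [pv_nested_eq]
  · funext st n1
    by_cases h : n1 < target
    · simp only [if_pos h, if_neg (by omega : ¬ n1 ≥ target)]
      congr 1
      funext st n2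
      unfold pvStepA
      by_cases h2 : n2 < target
      · simp only [if_neg (by omega : ¬ n2 ≥ target)]
        by_cases h3 : n1 + n2 ≤ target <;> simp [h2, h3]
      · simp [if_pos (by omega : n2 ≥ target), h2]
    · simp [h, if_pos (by omega : n1 ≥ target)]

-- B's second pass, rewritten to the canonical nested-guard shape
theorem pv_B_collect_eq (arr1 arr2 : List Int) (target best : Int) :
    arr1.foldl (fun (res : List (List Int)) num1 =>
      if num1 < target then
        arr2.foldl (fun res num2 =>
          if num2 < target ∧ num1 + num2 ≤ target ∧ num1 + num2 = best then
            res ++ [[num1, num2]]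
          else res) res
      else res) []
    = (pvQual arr1 arr2 target).foldl
        (fun res p => if p.1 + p.2 = best then res ++ [[p.1, p.2]] else res) [] := by
  rw [← pv_nested_eq (fun res n1 n2 => if n1 + n2 = best then res ++ [[n1, n2]] else res)]
  congr 1
  funext res n1
  by_cases h : n1 < target
  · simp only [if_pos h]
    congr 1
    funext res n2
    by_cases h2 : n2 < target ∧ n1 + n2 ≤ target
    · by_cases h3 : n1 + n2 = best <;> simp [h2, h3]
    · simp only [if_neg h2]
      rw [if_neg]; tauto
  · simp [h]

theorem pv_equal (arr1 arr2 : List Int) (target : Int) :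
    find_optimal_combination arr1 arr2 target = find_optimal_combination_alt arr1 arr2 target := by
  unfold find_optimal_combination_alt
  rw [pv_A_eq, pv_invariant]
  rw [pv_nested_eq (fun (b : Int) n1 n2 => if n1 + n2 > b then n1 + n2 else b) arr2 target arr1 0]
  rw [pv_B_collect_eq, pv_collect]
  simp [pvM]

-- ===== VERDICT (by name: the statement is the Claim_ definition above) =====
theorem find_optimal_combination_spec : Claim_equal_find_optimal_combination := by
  intro arr1 arr2 target _
  exact pv_equal arr1 arr2 target
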